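-- pv_equiv track=rewrite | github.com/nelson/pocketsmith-beancount-converter | src/cli/rule_commands.py | _consolidate_id_ranges
-- ===== SOURCE A (Python) =====
-- from typing import List, Dict, Any, Optional, Union, Tuple, Set
--
-- def _consolidate_id_ranges(rule_ids: List[int]) -> str:
--     """Consolidate a list of rule IDs into range notation.
--
--     Example: [1,3,4,5,7,8,10] -> "1, 3-5, 7-8, 10"
--     """
--     if not rule_ids:
--         return ""
--
--     sorted_ids = sorted(set(rule_ids))
--     ranges = []
--     start = sorted_ids[0]
--     end = sorted_ids[0]
--
--     for i in range(1, len(sorted_ids)):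
--         if sorted_ids[i] == end + 1:
--             # Consecutive number, extend range
--             end = sorted_ids[i]
--         else:
--             # Gap found, finalize current range
--             if start == end:
--                 ranges.append(str(start))
--             else:
--                 ranges.append(f"{start}-{end}")
--             start = end = sorted_ids[i]
--
--     # Add final range
--     if start == end:
--         ranges.append(str(start))
--     else:
--         ranges.append(f"{start}-{end}")
--
--     return ", ".join(ranges)
-- ===== SOURCE B (Python) =====
-- from typing import List
--
-- def _consolidate_id_ranges(rule_ids: List[int]) -> str:
--     """Consolidate a list of rule IDs into range notation.
--
--     Boundary-detection algorithm: x starts a run iff x-1 is not in the set,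
--     x ends a run iff x+1 is not in the set; zip the sorted boundary lists.
--     """
--     ids = set(rule_ids)
--     starts = sorted(x for x in ids if x - 1 not in ids)
--     ends = sorted(x for x in ids if x + 1 not in ids)
--     return ", ".join(
--         str(a) if a == b else f"{a}-{b}" for a, b in zip(starts, ends)
--     )
-- ===== Notes on version B (the rewrite author's own statement) =====
-- stated objective: alternative
-- what changed: Replaces A's single sequential scan carrying (start, end, ranges) state with a boundary-detection algorithm: x starts a run iff x-1 is not in the id set and ends one iff x+1 is not, so the runs are the zip of the two sorted boundary lists.
import Mathlib
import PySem

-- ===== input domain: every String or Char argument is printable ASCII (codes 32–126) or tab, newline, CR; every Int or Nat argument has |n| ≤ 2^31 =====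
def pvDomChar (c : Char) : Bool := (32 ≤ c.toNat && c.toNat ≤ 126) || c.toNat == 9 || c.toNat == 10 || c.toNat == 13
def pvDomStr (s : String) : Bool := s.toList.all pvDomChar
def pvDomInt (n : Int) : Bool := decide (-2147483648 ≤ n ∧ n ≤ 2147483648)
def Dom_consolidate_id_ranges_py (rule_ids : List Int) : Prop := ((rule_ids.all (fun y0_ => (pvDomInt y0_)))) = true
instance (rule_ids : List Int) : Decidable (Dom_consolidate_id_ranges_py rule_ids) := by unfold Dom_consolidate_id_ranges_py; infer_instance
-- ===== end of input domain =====

-- B replaces A's sequential scan carrying (start, end, ranges) state with boundary detection: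
-- x starts a run iff x-1 is not in the id set, ends one iff x+1 is not; zip the sorted boundary lists.

-- ===== PORT A =====
-- the body of A's for-loop, as one step of the foldl
def pvStepA (acc : List String × Int × Int) (x : Int) : List String × Int × Int :=
  if x == acc.2.2 + 1 then (acc.1, acc.2.1, x)
  else (acc.1 ++ [if acc.2.1 == acc.2.2 then PySem.Int.toStr acc.2.1
                  else PySem.Int.toStr acc.2.1 ++ "-" ++ PySem.Int.toStr acc.2.2], x, x)

def consolidate_id_ranges_py (rule_ids : List Int) : String :=
  if rule_ids.isEmpty then ""
  else
    match PySem.List.sorted (PySem.Set.ofList rule_ids) (fun x => x) false with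
    | [] => ""  -- unreachable: rule_ids is nonempty here
    | s0 :: tl =>
      let st := tl.foldl pvStepA ([], s0, s0)
      PySem.Str.join ", " (st.1 ++ [if st.2.1 == st.2.2 then PySem.Int.toStr st.2.1
                                    else PySem.Int.toStr st.2.1 ++ "-" ++ PySem.Int.toStr st.2.2])

-- ===== PORT B =====
def consolidate_id_ranges_py_alt (rule_ids : List Int) : String :=
  let ids : PySem.Set Int := PySem.Set.ofList rule_ids
  let starts := PySem.List.sorted (ids.filter (fun x => !(PySem.Set.contains ids (x - 1)))) (fun x => x) false
  let ends := PySem.List.sorted (ids.filter (fun x => !(PySem.Set.contains ids (x + 1)))) (fun x => x) false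
  PySem.Str.join ", " ((starts.zip ends).map (fun p =>
    if p.1 == p.2 then PySem.Int.toStr p.1
    else PySem.Int.toStr p.1 ++ "-" ++ PySem.Int.toStr p.2))

-- ===== PRECONDITION & SPEC =====
def Spec_consolidate_id_ranges_py (rule_ids : List Int) (out : String) : Prop := out = consolidate_id_ranges_py_alt rule_ids
instance (rule_ids : List Int) (out : String) : Decidable (Spec_consolidate_id_ranges_py rule_ids out) := by unfold Spec_consolidate_id_ranges_py; infer_instance

-- ===== CLAIM =====
def Claim_equal_consolidate_id_ranges_py : Prop := ∀ (rule_ids : List Int), Dom_consolidate_id_ranges_py rule_ids → Spec_consolidate_id_ranges_py rule_ids (consolidate_id_ranges_py rule_ids)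

-- ===== LEMMAS AND PROOFS =====

-- proof-side canonical description of both programs: the list of (start, end) runs
def pvRuns (s e : Int) : List Int → List (Int × Int)
  | [] => [(s, e)]
  | x :: xs => if x == e + 1 then pvRuns s x xs else (s, e) :: pvRuns x x xs

def pvFmtR (p : Int × Int) : String :=
  if p.1 == p.2 then PySem.Int.toStr p.1 else PySem.Int.toStr p.1 ++ "-" ++ PySem.Int.toStr p.2

-- A's fold, finalized, emits exactly the formatted runs
theorem pvFoldA_eq_runs (xs : List Int) : ∀ (ranges : List String) (s e : Int),
    (xs.foldl pvStepA (ranges, s, e)).1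
      ++ [pvFmtR ((xs.foldl pvStepA (ranges, s, e)).2.1, (xs.foldl pvStepA (ranges, s, e)).2.2)]
    = ranges ++ (pvRuns s e xs).map pvFmtR := by
  induction xs with
  | nil => intro ranges s e; simp [pvRuns, pvFmtR]
  | cons x xs ih =>
    intro ranges s e
    by_cases h : x = e + 1
    · simp [List.foldl_cons, pvStepA, pvRuns, h, ih]
    · simp only [List.foldl_cons, pvStepA, pvRuns, beq_iff_eq, if_neg h, ih]
      simp [pvFmtR]

-- List.contains as decidable membership, and small facts localising the membership tests
theorem pvContains_eq (l : List Int) (a : Int) : l.contains a = decide (a ∈ l) := by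
  induction l with
  | nil => simp
  | cons x xs ih =>
    by_cases h : a = x
    · simp [h]
    · simp [h]

theorem pvContains_cons_of_ne (a x : Int) (l : List Int) (h : a ≠ x) :
    (x :: l).contains a = l.contains a := by
  simp [List.mem_cons, h]

theorem pvNotContains (l : List Int) (a : Int) (h : a ∉ l) : (!(l.contains a)) = true := by
  simp [h]

theorem pvContainsT (l : List Int) (a : Int) (h : a ∈ l) : (!(l.contains a)) = false := by
  simp [h]

-- on a strictly increasing list e :: tl, the elements whose predecessor is absent
-- are exactly the run starts
theorem pvStarts (tl : List Int) : ∀ (s e : Int), (e :: tl).Pairwise (· < ·) →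
    s :: tl.filter (fun x => !((e :: tl).contains (x - 1))) = (pvRuns s e tl).map Prod.fst := by
  induction tl with
  | nil => intro s e _; simp [pvRuns]
  | cons x xs ih =>
    intro s e hp
    have he : ∀ y ∈ x :: xs, e < y := fun y hy => List.rel_of_pairwise_cons hp hy
    have hx' : ∀ y ∈ xs, x < y := fun y hy => List.rel_of_pairwise_cons hp.tail hy
    have hex : e < x := he x (by simp)
    have hred : ∀ y ∈ xs,
        (!((e :: x :: xs).contains (y - 1))) = (!((x :: xs).contains (y - 1))) := by
      intro y hy
      have h1 : x < y := hx' y hy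
      rw [pvContains_cons_of_ne (y - 1) e _ (by omega)]
    by_cases hx : x = e + 1
    · rw [pvRuns]
      simp only [beq_iff_eq, if_pos hx]
      rw [List.filter_cons]
      rw [pvContainsT (e :: x :: xs) (x - 1) (by simp only [List.mem_cons]; left; omega)]
      simp only [Bool.false_eq_true, if_false]
      rw [List.filter_congr hred]
      exact ih s x hp.tail
    · rw [pvRuns]
      simp only [beq_iff_eq, if_neg hx, List.map_cons]
      rw [List.filter_cons]
      rw [pvNotContains (e :: x :: xs) (x - 1) (by
        simp only [List.mem_cons]
        rintro (h | h | h)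
        · omega
        · omega
        · have := hx' _ h; omega)]
      rw [if_pos rfl]
      rw [List.filter_congr hred]
      have := ih x x hp.tail
      rw [← this]

-- the elements whose successor is absent are exactly the run ends
theorem pvEnds (tl : List Int) : ∀ (s e : Int), (e :: tl).Pairwise (· < ·) →
    (e :: tl).filter (fun x => !((e :: tl).contains (x + 1))) = (pvRuns s e tl).map Prod.snd := by
  induction tl with
  | nil =>
    intro s e _
    rw [pvRuns, List.filter_cons]
    rw [pvNotContains [e] (e + 1) (by intro h; simp only [List.mem_cons, List.not_mem_nil, or_false] at h; omega)]
    rfl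
  | cons x xs ih =>
    intro s e hp
    have he : ∀ y ∈ x :: xs, e < y := fun y hy => List.rel_of_pairwise_cons hp hy
    have hx' : ∀ y ∈ xs, x < y := fun y hy => List.rel_of_pairwise_cons hp.tail hy
    have hex : e < x := he x (by simp)
    have hred : ∀ y ∈ x :: xs,
        (!((e :: x :: xs).contains (y + 1))) = (!((x :: xs).contains (y + 1))) := by
      intro y hy
      have h1 : e < y := he y hy
      rw [pvContains_cons_of_ne (y + 1) e _ (by omega)]
    by_cases hx : x = e + 1
    · rw [pvRuns]
      simp only [beq_iff_eq, if_pos hx]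
      rw [List.filter_cons]
      rw [pvContainsT (e :: x :: xs) (e + 1) (by simp only [List.mem_cons]; right; left; omega)]
      simp only [Bool.false_eq_true, if_false]
      rw [List.filter_congr hred]
      exact ih s x hp.tail
    · rw [pvRuns]
      simp only [beq_iff_eq, if_neg hx, List.map_cons]
      rw [List.filter_cons]
      rw [pvNotContains (e :: x :: xs) (e + 1) (by
        simp only [List.mem_cons]
        rintro (h | h | h)
        · omega
        · omega
        · have := hx' _ h; omega)]
      rw [if_pos rfl]
      rw [List.filter_congr hred]
      rw [ih x x hp.tail]

-- ===== VERDICT =====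
theorem consolidate_id_ranges_py_spec : Claim_equal_consolidate_id_ranges_py := by
  intro rule_ids _
  unfold Spec_consolidate_id_ranges_py
  by_cases hE : rule_ids = []
  · subst hE; rfl
  · obtain ⟨a, as, hE'⟩ := List.exists_cons_of_ne_nil hE
    have hne : PySem.List.sorted (PySem.Set.ofList rule_ids) (fun x => x) false ≠ [] := by
      rw [Ne, PySem.List.sorted_eq_nil_iff]
      intro h0
      have : a ∈ PySem.Set.ofList rule_ids := by
        rw [PySem.Set.mem_ofList, hE']; exact List.mem_cons_self ..
      rw [h0] at this
      exact List.not_mem_nil this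
    obtain ⟨s0, tl, hS⟩ := List.exists_cons_of_ne_nil hne
    have hpw : (s0 :: tl).Pairwise (· < ·) := by
      rw [← hS]; exact PySem.List.sorted_ofList_pairwise_lt rule_ids
    -- sorted(filter p set) = filter p (sorted set), for any p
    have hsf : ∀ p : Int → Bool,
        PySem.List.sorted ((PySem.Set.ofList rule_ids).filter p) (fun x => x) false
          = (s0 :: tl).filter p := by
      intro p
      apply PySem.List.sorted_eq_of_perm_of_pairwise_lt
      · exact (List.Perm.filter p (hS ▸ PySem.List.sorted_perm ..))
      · exact hpw.filter p
    -- replace membership in the set by membership in its sorted list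
    have hmemEq : ∀ y : Int,
        PySem.Set.contains (PySem.Set.ofList rule_ids) y = (s0 :: tl).contains y := by
      intro y
      rw [PySem.Set.contains_eq_listContains, pvContains_eq, pvContains_eq]
      have : y ∈ PySem.Set.ofList rule_ids ↔ y ∈ s0 :: tl := by
        rw [← hS, PySem.List.mem_sorted]
      simp [this]
    have hs0 : ∀ y ∈ s0 :: tl, s0 ≤ y := by
      intro y hy
      rcases List.mem_cons.mp hy with h | h
      · omega
      · have := List.rel_of_pairwise_cons hpw h; omega
    -- the starts list
    have hstarts :
        PySem.List.sorted ((PySem.Set.ofList rule_ids).filter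
            (fun x => !(PySem.Set.contains (PySem.Set.ofList rule_ids) (x - 1)))) (fun x => x) false
          = (pvRuns s0 s0 tl).map Prod.fst := by
      rw [hsf, List.filter_congr (fun y _ => by rw [hmemEq (y - 1)]), List.filter_cons]
      have hc : (!((s0 :: tl).contains (s0 - 1))) = true := by
        rw [pvContains_eq]
        simp only [Bool.not_eq_true', decide_eq_false_iff_not]
        intro h
        have := hs0 _ h; omega
      rw [hc]
      rw [if_pos rfl]
      exact pvStarts tl s0 s0 hpw
    -- the ends list
    have hends :
        PySem.List.sorted ((PySem.Set.ofList rule_ids).filter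
            (fun x => !(PySem.Set.contains (PySem.Set.ofList rule_ids) (x + 1)))) (fun x => x) false
          = (pvRuns s0 s0 tl).map Prod.snd := by
      rw [hsf, List.filter_congr (fun y _ => by rw [hmemEq (y + 1)])]
      exact pvEnds tl s0 s0 hpw
    -- assemble
    rw [consolidate_id_ranges_py, consolidate_id_ranges_py_alt]
    simp only [hS]
    have hEmp : (rule_ids.isEmpty = false) := by simp [hE]
    rw [hEmp]
    simp only [Bool.false_eq_true, if_false]
    have hA := pvFoldA_eq_runs tl [] s0 s0
    simp only [List.nil_append] at hA
    show PySem.Str.join ", "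
        ((tl.foldl pvStepA ([], s0, s0)).1
          ++ [pvFmtR ((tl.foldl pvStepA ([], s0, s0)).2.1, (tl.foldl pvStepA ([], s0, s0)).2.2)])
      = _
    rw [hA, hstarts, hends, List.zip_map']
    congr 1
    rw [List.map_map]
    exact (List.map_congr_left (fun p _ => by simp [pvFmtR])).symm
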